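-- pv_equiv track=rewrite | github.com/MolfarUA/CodeWars_Solutions | 5 kyu/Max sum path/solution.py | max_sum_path
-- ===== SOURCE A (Python) =====
-- def max_sum_path(l1, l2):
--
--     value, l1_last, l2_last = 0, 0, 0
--
--     match = sorted(set(l1) & set(l2))
--
--     for i in sorted(set(l1) & set(l2)):
--
--             l1_idx = l1.index(i, l1_last)
--             l2_idx = l2.index(i, l2_last)
--
--             value += max(sum(l1[l1_last:l1_idx]), sum(l2[l2_last:l2_idx]))
--
--             l1_last, l2_last = l1_idx, l2_idx
--
--     return value + max(sum(l1[l1_last:]), sum(l2[l2_last:]))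
-- ===== SOURCE B (Python) =====
-- def max_sum_path(l1, l2):
--     # Index every value's positions once and use prefix sums, instead of
--     # repeated list.index scans and slice sums.
--     pos1 = {}
--     for j, x in enumerate(l1):
--         pos1.setdefault(x, []).append(j)
--     pos2 = {}
--     for j, x in enumerate(l2):
--         pos2.setdefault(x, []).append(j)
--     pre1 = [0]
--     for x in l1:
--         pre1.append(pre1[-1] + x)
--     pre2 = [0]
--     for x in l2:
--         pre2.append(pre2[-1] + x)
--     total, a, b = 0, 0, 0
--     for v in sorted(k for k in pos1 if k in pos2):
--         i = next(j for j in pos1[v] if j >= a)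
--         k = next(j for j in pos2[v] if j >= b)
--         total += max(pre1[i] - pre1[a], pre2[k] - pre2[b])
--         a, b = i, k
--     return total + max(pre1[-1] - pre1[a], pre2[-1] - pre2[b])
-- ===== Notes on version B (the rewrite author's own statement) =====
-- stated objective: alternative
-- what changed: B builds a value-to-positions dictionary and prefix-sum tables once per list and answers each common value by a lookup plus two prefix-sum subtractions, instead of A's repeated list.index(v, start) scans and sum(slice) segment sums.
import Mathlib
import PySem

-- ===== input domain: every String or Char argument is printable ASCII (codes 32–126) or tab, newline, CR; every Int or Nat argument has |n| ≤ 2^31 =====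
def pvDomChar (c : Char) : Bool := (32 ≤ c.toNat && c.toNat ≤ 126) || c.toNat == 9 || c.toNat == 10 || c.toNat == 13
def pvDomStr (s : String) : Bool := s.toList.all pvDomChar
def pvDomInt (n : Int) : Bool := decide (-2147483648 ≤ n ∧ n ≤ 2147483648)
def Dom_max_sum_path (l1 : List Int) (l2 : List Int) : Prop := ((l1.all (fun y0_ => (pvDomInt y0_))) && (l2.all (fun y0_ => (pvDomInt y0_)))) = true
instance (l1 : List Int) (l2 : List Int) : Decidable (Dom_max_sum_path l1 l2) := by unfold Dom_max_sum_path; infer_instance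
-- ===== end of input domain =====

-- B replaces A's repeated `list.index(v, start)` scans and `sum(slice)` segment sums by a
-- positions dictionary built once per list plus prefix-sum tables (objective: alternative).

-- ===== PORT A =====
-- l.index(v, start) with 0 ≤ start: scan from `start`; none = ValueError (exact for the
-- nonnegative starts A uses: its starts are 0 and previously found indices)
def pyIndexFrom? (xs : List Int) (v : Int) (start : Int) : Option Int :=
  (PySem.List.index? (xs.drop start.toNat) v).map (fun k => start + (k : Int))

-- the body of A's for-loop; `none` = a ValueError was raised earlier
def stepA (l1 l2 : List Int) (st : Option (Int × Int × Int)) (i : Int) : Option (Int × Int × Int) :=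
  match st with
  | none => none
  | some (value, l1_last, l2_last) =>
    match pyIndexFrom? l1 i l1_last, pyIndexFrom? l2 i l2_last with
    | some l1_idx, some l2_idx =>
      some (value + max (PySem.List.slice l1 (some l1_last) (some l1_idx)).sum
                       (PySem.List.slice l2 (some l2_last) (some l2_idx)).sum,
            l1_idx, l2_idx)
    | _, _ => none

def max_sum_path (l1 : List Int) (l2 : List Int) : Int :=
  -- A also binds `match = sorted(set(l1) & set(l2))` but never uses it
  let commons := PySem.List.sorted ((PySem.Set.ofList l1).inter l2) (fun x => x) false
  match commons.foldl (stepA l1 l2) (some ((0 : Int), (0 : Int), (0 : Int))) with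
  | some (value, l1_last, l2_last) =>
      value + max (PySem.List.slice l1 (some l1_last) none).sum
                  (PySem.List.slice l2 (some l2_last) none).sum
  | none => 0   -- unreachable under Pre_ (the Python raises ValueError instead)

-- ===== PORT B =====
-- {v: [positions of v]} built by pos.setdefault(x, []).append(j) over enumerate(l)
def buildPos (l : List Int) : PySem.Dict Int (List Int) :=
  (PySem.List.enumerate l 0).foldl
    (fun d p => d.modify p.2 [] (fun L => L ++ [p.1])) PySem.Dict.empty

-- pre = [0]; for x in l: pre.append(pre[-1] + x)
def buildPre (l : List Int) : List Int :=
  l.foldl (fun acc x => acc ++ [PySem.List.pyGetD acc (-1) 0 + x]) [0]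

-- the body of B's for-loop; `none` = a StopIteration was raised earlier
def stepB (pos1 pos2 : PySem.Dict Int (List Int)) (pre1 pre2 : List Int)
    (st : Option (Int × Int × Int)) (v : Int) : Option (Int × Int × Int) :=
  match st with
  | none => none
  | some (total, a, b) =>
    match (pos1.getD v []).find? (fun j => a ≤ j), (pos2.getD v []).find? (fun j => b ≤ j) with
    | some i, some k =>
      some (total + max (PySem.List.pyGetD pre1 i 0 - PySem.List.pyGetD pre1 a 0)
                       (PySem.List.pyGetD pre2 k 0 - PySem.List.pyGetD pre2 b 0),
            i, k)
    | _, _ => none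

def max_sum_path_alt (l1 : List Int) (l2 : List Int) : Int :=
  let pos1 := buildPos l1
  let pos2 := buildPos l2
  let pre1 := buildPre l1
  let pre2 := buildPre l2
  let commons := PySem.List.sorted (pos1.keys.filter (fun k => pos2.contains k)) (fun x => x) false
  match commons.foldl (stepB pos1 pos2 pre1 pre2) (some ((0 : Int), (0 : Int), (0 : Int))) with
  | some (total, a, b) =>
      total + max (PySem.List.pyGetD pre1 (-1) 0 - PySem.List.pyGetD pre1 a 0)
                  (PySem.List.pyGetD pre2 (-1) 0 - PySem.List.pyGetD pre2 b 0)
  | none => 0   -- unreachable under Pre_ (the Python raises StopIteration instead)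

-- ===== PRECONDITION & SPEC =====
-- Pre_ excludes exactly the inputs on which A raises ValueError: the sorted common values
-- must occur, in that order, as a subsequence of each list (B raises StopIteration there too).
def Pre_max_sum_path (l1 : List Int) (l2 : List Int) : Prop :=
  (PySem.List.sorted ((PySem.Set.ofList l1).inter l2) (fun x => x) false).Sublist l1 ∧
  (PySem.List.sorted ((PySem.Set.ofList l1).inter l2) (fun x => x) false).Sublist l2
instance (l1 : List Int) (l2 : List Int) : Decidable (Pre_max_sum_path l1 l2) := by
  unfold Pre_max_sum_path; infer_instance

def pvWitness_max_sum_path : List Int × List Int := ([1, -2, 4], [0, -2, 3])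

def Spec_max_sum_path (l1 : List Int) (l2 : List Int) (out : Int) : Prop := out = max_sum_path_alt l1 l2
instance (l1 : List Int) (l2 : List Int) (out : Int) : Decidable (Spec_max_sum_path l1 l2 out) := by unfold Spec_max_sum_path; infer_instance

-- ===== CLAIM (what is proved, stated in full; the proofs are below) =====
def Claim_equal_max_sum_path : Prop := ∀ (l1 : List Int) (l2 : List Int), Dom_max_sum_path l1 l2 → Pre_max_sum_path l1 l2 → Spec_max_sum_path l1 l2 (max_sum_path l1 l2)

-- ===== LEMMAS AND PROOFS =====

-- find? only looks at the predicate's values on the list's elements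
theorem find?_ext {α : Type} (l : List α) (p q : α → Bool)
    (h : ∀ a ∈ l, p a = q a) : l.find? p = l.find? q := by
  induction l with
  | nil => rfl
  | cons x t ih =>
    have hx := h x (by simp)
    simp only [List.find?_cons]
    rw [hx]
    cases q x
    · exact ih (fun a ha => h a (by simp [ha]))
    · rfl

-- running prefix sums, as produced by B's `pre` loop after the initial 0
def psums : Int → List Int → List Int
  | _, [] => []
  | s, x :: t => (s + x) :: psums (s + x) t

theorem pyGetD_append_singleton_neg_one (acc : List Int) (y : Int) :
    PySem.List.pyGetD (acc ++ [y]) (-1) 0 = y := by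
  simp [PySem.List.pyGetD, PySem.List.pyGet?, PySem.List.pyIdx?]

theorem buildPre_go (l : List Int) : ∀ (acc : List Int) (s : Int),
    PySem.List.pyGetD acc (-1) 0 = s → acc ≠ [] →
    l.foldl (fun acc x => acc ++ [PySem.List.pyGetD acc (-1) 0 + x]) acc = acc ++ psums s l := by
  induction l with
  | nil => intro acc s _ _; simp [psums]
  | cons x t ih =>
    intro acc s hs hne
    simp only [List.foldl_cons, psums]
    rw [hs, ih (acc ++ [s + x]) (s + x) (pyGetD_append_singleton_neg_one acc (s + x)) (by simp)]
    simp

theorem buildPre_eq (l : List Int) : buildPre l = 0 :: psums 0 l := by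
  unfold buildPre
  rw [buildPre_go l [0] 0 (by simp [PySem.List.pyGetD, PySem.List.pyGet?, PySem.List.pyIdx?]) (by simp)]
  simp

theorem psums_length (l : List Int) : ∀ s : Int, (psums s l).length = l.length := by
  induction l with
  | nil => intro s; rfl
  | cons x t ih => intro s; simp [psums, ih]

theorem psums_getElem (l : List Int) : ∀ (s : Int) (k : Nat) (h : k < l.length),
    (psums s l)[k]'((psums_length l s).symm ▸ h) = s + (l.take (k + 1)).sum := by
  induction l with
  | nil => intro s k h; simp at h
  | cons x t ih =>
    intro s k h
    cases k with
    | zero => simp [psums]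
    | succ j =>
      simp only [psums, List.getElem_cons_succ, List.take_succ_cons, List.sum_cons]
      rw [ih (s + x) j (by simpa using h)]
      ring

theorem pre_get (l : List Int) (i : Nat) (h : i ≤ l.length) :
    PySem.List.pyGetD (buildPre l) (i : Int) 0 = (l.take i).sum := by
  rw [buildPre_eq, PySem.List.pyGetD_natCast]
  cases i with
  | zero => simp
  | succ j =>
    have hj : j < l.length := by omega
    have hj' : j < (psums 0 l).length := by rw [psums_length]; exact hj
    simp only [List.getD_cons_succ]
    rw [List.getD_eq_getElem _ _ hj', psums_getElem l 0 j hj]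
    simp

theorem pre_last (l : List Int) :
    PySem.List.pyGetD (buildPre l) (-1) 0 = l.sum := by
  rcases List.eq_nil_or_concat l with h | ⟨t, y, h⟩
  · subst h; rfl
  · have : buildPre l = (0 :: psums 0 t) ++ [l.sum] := by
      rw [buildPre_eq, h, List.concat_eq_append]
      have : ∀ (t : List Int) (s : Int) (y : Int),
          psums s (t ++ [y]) = psums s t ++ [s + (t ++ [y]).sum] := by
        intro t
        induction t with
        | nil => intro s y; simp [psums]
        | cons z r ih => intro s y; simp [psums, ih (s + z)]; ring
      rw [this t 0 y]; simp
      
    rw [this, pyGetD_append_singleton_neg_one]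

-- the positions dict maps v to the indices (as ints) at which v occurs, in order
theorem pos_getD (l : List Int) (v : Int) :
    (buildPos l).getD v [] =
      ((PySem.List.enumerate l 0).filter (fun p => p.2 == v)).map (fun p => p.1) := by
  have h : buildPos l = ((PySem.List.enumerate l 0).map Prod.swap).foldl
      (fun d p => d.modify p.1 [] (fun L => L ++ [p.2])) PySem.Dict.empty := by
    unfold buildPos
    rw [List.foldl_map]
    rfl
  rw [h, PySem.Dict.getD_foldl_modify_append]
  simp [List.filter_map, List.map_map, Function.comp_def, Prod.swap]

-- every recorded position is ≥ the enumeration start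
theorem pos_ge (l : List Int) (s : Int) (v : Int) :
    ∀ j ∈ ((PySem.List.enumerate l s).filter (fun p => p.2 == v)).map (fun p => p.1), s ≤ j := by
  intro j hj
  simp only [List.mem_map, List.mem_filter] at hj
  obtain ⟨p, ⟨hp, _⟩, rfl⟩ := hj
  rw [PySem.List.mem_enumerate_iff] at hp
  obtain ⟨k, hk, rfl⟩ := hp
  show s ≤ s + (k : Int)
  omega

-- first recorded position ≥ s + n of v  =  s + n + (first index of v in l.drop n)
theorem find_pos (v : Int) : ∀ (l : List Int) (s : Int) (n : Nat),
    (((PySem.List.enumerate l s).filter (fun p => p.2 == v)).map (fun p => p.1)).find?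
        (fun j => decide (s + (n : Int) ≤ j))
      = (PySem.List.index? (l.drop n) v).map (fun k => s + (n : Int) + (k : Int)) := by
  intro l
  induction l with
  | nil =>
    intro s n
    simp [PySem.List.enumerate_nil, PySem.List.index?]
  | cons x t ih =>
    intro s n
    rw [PySem.List.enumerate_cons]
    cases n with
    | zero =>
      by_cases hx : x = v
      · subst hx
        simp only [List.drop_zero, List.filter_cons, beq_self_eq_true, if_pos, List.map_cons,
          List.find?_cons, PySem.List.index?_cons_self, Nat.cast_zero, add_zero]
        rw [show decide (s ≤ s) = true from by simp]
        simp
      · have hbeq : ((s, x).2 == v) = false := beq_eq_false_iff_ne.mpr hx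
        simp only [List.drop_zero, List.filter_cons, hbeq, if_neg Bool.false_ne_true]
        rw [find?_ext _ _ (fun j => decide (s + 1 + ((0 : Nat) : Int) ≤ j))
          (by
            intro j hj
            have := pos_ge t (s + 1) v j hj
            simp only [decide_eq_decide]
            omega)]
        rw [ih (s + 1) 0, PySem.List.index?_cons_of_ne t hx]
        cases hidx : PySem.List.index? t v with
        | none =>
          simp only [PySem.List.index?_eq_idxOf?] at hidx
          simp [hidx]
        | some k =>
          simp only [PySem.List.index?_eq_idxOf?] at hidx
          simp [hidx]
          ring
    | succ m =>
      have hdrop : (x :: t).drop (m + 1) = t.drop m := by simp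
      rw [hdrop]
      have htail : ((List.filter (fun p => p.2 == v) ((s, x) :: PySem.List.enumerate t (s + 1))).map
            (fun p => p.1)).find? (fun j => decide (s + ((m + 1 : Nat) : Int) ≤ j))
          = (((PySem.List.enumerate t (s + 1)).filter (fun p => p.2 == v)).map
            (fun p => p.1)).find? (fun j => decide (s + ((m + 1 : Nat) : Int) ≤ j)) := by
        by_cases hx : ((s, x).2 == v) = true
        · simp only [List.filter_cons, hx, if_pos, List.map_cons, List.find?_cons]
          rw [show decide (s + ((m + 1 : Nat) : Int) ≤ s) = false from
            decide_eq_false_iff_not.mpr (by push_cast; omega)]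
        · simp only [List.filter_cons, hx, if_neg Bool.false_ne_true]
      rw [htail]
      rw [find?_ext _ _ (fun j => decide (s + 1 + (m : Int) ≤ j))
        (by
          intro j _
          simp only [decide_eq_decide]
          push_cast
          omega)]
      rw [ih (s + 1) m]
      cases PySem.List.index? (t.drop m) v with
      | none => simp
      | some k =>
        simp
        ring

theorem step_find (l : List Int) (v : Int) (a : Nat) :
    ((buildPos l).getD v []).find? (fun j => decide ((a : Int) ≤ j))
      = (PySem.List.index? (l.drop a) v).map (fun k => (a : Int) + (k : Int)) := by
  rw [pos_getD]
  have h := find_pos v l 0 a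
  simpa using h

theorem slice_sum (l : List Int) (a i : Nat) (hai : a ≤ i) :
    (PySem.List.slice l (some (a : Int)) (some (i : Int))).sum = (l.take i).sum - (l.take a).sum := by
  rw [PySem.List.slice_natCast]
  have h2 : l.take i = l.take a ++ (l.drop a).take (i - a) := by
    rw [← List.take_add]
    congr 1
    omega
  rw [h2, List.sum_append]
  ring

theorem slice_from_sum (l : List Int) (a : Nat) :
    (PySem.List.slice l (some (a : Int)) none).sum = l.sum - (l.take a).sum := by
  rw [PySem.List.slice_from_natCast]
  have := List.take_append_drop a l
  have hsum : (l.take a).sum + (l.drop a).sum = l.sum := by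
    rw [← List.sum_append, this]
  omega

-- consuming one matched value keeps the rest a sublist of the remaining suffix
theorem sublist_after_index {v : Int} {r pre suf : List Int}
    (h : (v :: r).Sublist (pre ++ v :: suf)) (hpre : v ∉ pre) : r.Sublist suf := by
  induction pre with
  | nil => exact List.cons_sublist_cons.mp h
  | cons q pre' ih =>
    simp only [List.cons_append] at h
    rcases List.sublist_cons_iff.mp h with h' | ⟨rr, heq, _⟩
    · exact ih h' (fun hm => hpre (List.mem_cons_of_mem q hm))
    · cases heq
      simp at hpre

theorem index_step {l : List Int} {v : Int} {r : List Int} {a : Nat}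
    (ha : a ≤ l.length) (h : (v :: r).Sublist (l.drop a)) :
    ∃ k : Nat, PySem.List.index? (l.drop a) v = some k ∧
      a + k < l.length ∧ r.Sublist (l.drop (a + k)) := by
  have hv : v ∈ l.drop a := h.subset (by simp)
  obtain ⟨k, hk⟩ := Option.isSome_iff_exists.mp ((PySem.List.index?_isSome_iff _ _).mpr hv)
  obtain ⟨pre, suf, hsplit, hlen, hnotin⟩ := (PySem.List.index?_eq_some_iff _ _ _).mp hk
  rw [hsplit] at h
  have hr : r.Sublist suf := sublist_after_index h hnotin
  have hdrop : l.drop (a + k) = v :: suf := by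
    rw [← List.drop_drop, hsplit, ← hlen, List.drop_left]
  refine ⟨k, hk, ?_, ?_⟩
  · have hdl := congrArg List.length hsplit
    simp [List.length_drop] at hdl
    omega
  · rw [hdrop]
    exact hr.trans (List.sublist_cons_self v suf)

-- the two loops run in lockstep
theorem loop_eq (l1 l2 : List Int) : ∀ (c : List Int) (t : Int) (a b : Nat),
    a ≤ l1.length → b ≤ l2.length → c.Sublist (l1.drop a) → c.Sublist (l2.drop b) →
    ∃ (t' : Int) (a' b' : Nat), a' ≤ l1.length ∧ b' ≤ l2.length ∧
      c.foldl (stepA l1 l2) (some (t, (a : Int), (b : Int))) = some (t', (a' : Int), (b' : Int)) ∧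
      c.foldl (stepB (buildPos l1) (buildPos l2) (buildPre l1) (buildPre l2))
          (some (t, (a : Int), (b : Int))) = some (t', (a' : Int), (b' : Int)) := by
  intro c
  induction c with
  | nil =>
    intro t a b ha hb _ _
    exact ⟨t, a, b, ha, hb, rfl, rfl⟩
  | cons v r ih =>
    intro t a b ha hb h1 h2
    obtain ⟨k1, hk1, hlt1, hr1⟩ := index_step ha h1
    obtain ⟨k2, hk2, hlt2, hr2⟩ := index_step hb h2
    have hA : stepA l1 l2 (some (t, (a : Int), (b : Int))) v
        = some (t + max ((l1.take (a + k1)).sum - (l1.take a).sum)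
                       ((l2.take (b + k2)).sum - (l2.take b).sum),
                ((a + k1 : Nat) : Int), ((b + k2 : Nat) : Int)) := by
      have c1 : (a : Int) + (k1 : Int) = ((a + k1 : Nat) : Int) := by push_cast; ring
      have c2 : (b : Int) + (k2 : Int) = ((b + k2 : Nat) : Int) := by push_cast; ring
      simp only [stepA, pyIndexFrom?, Int.toNat_natCast, hk1, hk2, Option.pure_def,
        Option.bind_eq_bind, Option.bind_some, Option.map_some]
      rw [c1, c2, slice_sum l1 a (a + k1) (by omega), slice_sum l2 b (b + k2) (by omega)]
    have hB : stepB (buildPos l1) (buildPos l2) (buildPre l1) (buildPre l2)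
          (some (t, (a : Int), (b : Int))) v
        = some (t + max ((l1.take (a + k1)).sum - (l1.take a).sum)
                       ((l2.take (b + k2)).sum - (l2.take b).sum),
                ((a + k1 : Nat) : Int), ((b + k2 : Nat) : Int)) := by
      have c1 : (a : Int) + (k1 : Int) = ((a + k1 : Nat) : Int) := by push_cast; ring
      have c2 : (b : Int) + (k2 : Int) = ((b + k2 : Nat) : Int) := by push_cast; ring
      simp only [stepB, step_find l1 v a, step_find l2 v b, hk1, hk2, Option.pure_def,
        Option.bind_eq_bind, Option.bind_some, Option.map_some]
      rw [c1, c2, pre_get l1 (a + k1) (by omega), pre_get l1 a (by omega),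
        pre_get l2 (b + k2) (by omega), pre_get l2 b (by omega)]
    rw [List.foldl_cons, List.foldl_cons, hA, hB]
    exact ih _ (a + k1) (b + k2) (by omega) (by omega) hr1 hr2

-- both programs sort the same list of common values
theorem commons_eq (l1 l2 : List Int) :
    PySem.List.sorted ((PySem.Set.ofList l1).inter l2) (fun x => x) false
      = PySem.List.sorted ((buildPos l1).keys.filter (fun k => (buildPos l2).contains k)) (fun x => x) false := by
  have hkeys : ∀ l : List Int, (buildPos l).keys = PySem.Set.ofList l := by
    intro l
    unfold buildPos
    rw [PySem.Dict.keys_foldl_modify_key (PySem.List.enumerate l 0) (fun p => p.2) []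
        (fun _ p => fun L => L ++ [p.1]) PySem.Dict.empty]
    rw [PySem.Dict.keys_empty, PySem.List.map_snd_enumerate]
    rfl
  congr 1
  rw [hkeys l1]
  show List.filter (fun x => PySem.Set.contains l2 x) (PySem.Set.ofList l1)
      = List.filter (fun k => (buildPos l2).contains k) (PySem.Set.ofList l1)
  apply List.filter_congr
  intro k _
  rw [Bool.eq_iff_iff, PySem.Set.contains_iff, PySem.Dict.contains_iff_mem_keys,
    hkeys l2, PySem.Set.mem_ofList]

-- ===== VERDICT (by name: the statement is the Claim_ definition above) =====
theorem max_sum_path_spec : Claim_equal_max_sum_path := by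
  intro l1 l2 _ hpre
  unfold Spec_max_sum_path max_sum_path max_sum_path_alt
  dsimp only
  rw [← commons_eq l1 l2]
  obtain ⟨h1, h2⟩ := hpre
  obtain ⟨t', a', b', ha', hb', hA, hB⟩ :=
    loop_eq l1 l2 (PySem.List.sorted ((PySem.Set.ofList l1).inter l2) (fun x => x) false)
      0 0 0 (by omega) (by omega) (by simpa using h1) (by simpa using h2)
  simp only [Nat.cast_zero] at hA hB
  rw [hA, hB]
  dsimp only
  rw [slice_from_sum l1 a', slice_from_sum l2 b', pre_last l1, pre_last l2,
    pre_get l1 a' ha', pre_get l2 b' hb']
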